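-- pv_equiv track=rewrite | github.com/m1m0r1/galgo | galgo/tools/imgt.py | mask_left
-- ===== SOURCE A (Python) =====
-- def mask_left(seq, length, mask_char='N', alphabets='ACGT'):
--     """
--     >>> mask_left('NNAA-NATA', 3)
--     'NNNN-NNTA'
--     >>> mask_left('NNAA-NATA', 4)
--     'NNNN-NNNA'
--     >>> mask_left('NNAA-NATA', 1, alphabets='T')
--     'NNAA-NANA'
--     """
--     def emitter():
--         count = length
--         for b in seq:
--             if count and b in alphabets:
--                 yield mask_char
--                 count -= 1
--             else:
--                 yield b
--
--     it = emitter()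
--     return ''.join(it)
-- ===== SOURCE B (Python) =====
-- def mask_left(seq, length, mask_char='N', alphabets='ACGT'):
--     # Pass 1: collect indices of the maskable characters (stop once the
--     # budget reaches 0; a negative budget never reaches 0, so all are taken).
--     masked = set()
--     remaining = length
--     for i, b in enumerate(seq):
--         if remaining == 0:
--             break
--         if b in alphabets:
--             masked.add(i)
--             remaining -= 1
--     # Pass 2: emit.
--     return ''.join(mask_char if i in masked else b for i, b in enumerate(seq))
-- ===== Notes on version B (the rewrite author's own statement) =====
-- stated objective: alternative
-- what changed: Replaces the generator that threads a countdown through a single emit loop with two passes: one pass collects the set of indices to mask (stopping when the budget hits 0), a second pass builds the output by index-set membership.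
import Mathlib
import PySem

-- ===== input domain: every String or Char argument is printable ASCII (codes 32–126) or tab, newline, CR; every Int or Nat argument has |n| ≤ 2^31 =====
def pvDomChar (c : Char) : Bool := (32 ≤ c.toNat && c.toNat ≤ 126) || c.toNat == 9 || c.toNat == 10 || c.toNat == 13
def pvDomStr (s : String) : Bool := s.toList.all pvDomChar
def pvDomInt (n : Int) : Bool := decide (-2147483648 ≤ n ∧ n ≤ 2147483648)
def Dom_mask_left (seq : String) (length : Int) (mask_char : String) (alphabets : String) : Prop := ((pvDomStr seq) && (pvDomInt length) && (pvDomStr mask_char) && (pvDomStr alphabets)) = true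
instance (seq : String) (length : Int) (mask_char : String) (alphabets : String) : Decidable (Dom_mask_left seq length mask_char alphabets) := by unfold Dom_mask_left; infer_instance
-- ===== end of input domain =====

-- B replaces A's countdown-threading emit loop by two passes over the string
-- (collect the index set to mask, then emit by membership); alternative
-- decomposition, same cost.

-- ===== PORT A =====
-- A: one fold over the characters carrying (count, output-so-far); a character
-- in `alphabets` is replaced by mask_char while count ≠ 0 (Python truthiness).
def mask_left (seq : String) (length : Int) (mask_char : String) (alphabets : String) : String :=
  String.mk (seq.toList.foldl
    (fun (st : Int × List Char) (b : Char) =>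
      if st.1 ≠ 0 ∧ b ∈ alphabets.toList then (st.1 - 1, st.2 ++ mask_char.toList)
      else (st.1, st.2 ++ [b]))
    (length, [])).2

-- ===== PORT B =====
-- Pass 1: indices of the characters to mask (budget `remaining`; stop at 0).
def maskIdxs (cs : List Char) (alphabets : String) (remaining : Int) (i : Nat) : List Nat :=
  match cs with
  | [] => []
  | b :: rest =>
    if remaining = 0 then []
    else if b ∈ alphabets.toList then i :: maskIdxs rest alphabets (remaining - 1) (i + 1)
    else maskIdxs rest alphabets remaining (i + 1)

-- Pass 2: emit mask_char at masked indices, the original character elsewhere.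
def emitMasked (cs : List Char) (i : Nat) (masked : List Nat) (mask_char : String) : List Char :=
  match cs with
  | [] => []
  | b :: rest =>
    (if i ∈ masked then mask_char.toList else [b]) ++ emitMasked rest (i + 1) masked mask_char

def mask_left_alt (seq : String) (length : Int) (mask_char : String) (alphabets : String) : String :=
  String.mk (emitMasked seq.toList 0 (maskIdxs seq.toList alphabets length 0) mask_char)

-- ===== PRECONDITION & SPEC =====
def Spec_mask_left (seq : String) (length : Int) (mask_char : String) (alphabets : String) (out : String) : Prop := out = mask_left_alt seq length mask_char alphabets
instance (seq : String) (length : Int) (mask_char : String) (alphabets : String) (out : String) : Decidable (Spec_mask_left seq length mask_char alphabets out) := by unfold Spec_mask_left; infer_instance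

-- ===== CLAIM (what is proved, stated in full; the proofs are below) =====
def Claim_equal_mask_left : Prop := ∀ (seq : String) (length : Int) (mask_char : String) (alphabets : String), Dom_mask_left seq length mask_char alphabets → Spec_mask_left seq length mask_char alphabets (mask_left seq length mask_char alphabets)

-- ===== LEMMAS AND PROOFS =====

-- Reference recursion both ports are reduced to.
def goMask (cs : List Char) (count : Int) (mask_char alphabets : String) : List Char :=
  match cs with
  | [] => []
  | b :: rest =>
    if count ≠ 0 ∧ b ∈ alphabets.toList then mask_char.toList ++ goMask rest (count - 1) mask_char alphabets
    else b :: goMask rest count mask_char alphabets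

theorem foldl_eq_goMask (mask_char alphabets : String) :
    ∀ (cs : List Char) (count : Int) (acc : List Char),
    (cs.foldl
      (fun (st : Int × List Char) (b : Char) =>
        if st.1 ≠ 0 ∧ b ∈ alphabets.toList then (st.1 - 1, st.2 ++ mask_char.toList)
        else (st.1, st.2 ++ [b]))
      (count, acc)).2 = acc ++ goMask cs count mask_char alphabets := by
  intro cs
  induction cs with
  | nil => intro count acc; simp [goMask]
  | cons b rest ih =>
    intro count acc
    by_cases h : count ≠ 0 ∧ b ∈ alphabets.toList
    · simp [goMask, h, ih]
    · simp [goMask, h, ih]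

theorem maskIdxs_ge (alphabets : String) :
    ∀ (cs : List Char) (r : Int) (i j : Nat),
    j ∈ maskIdxs cs alphabets r i → i ≤ j := by
  intro cs
  induction cs with
  | nil => intro r i j h; simp [maskIdxs] at h
  | cons b rest ih =>
    intro r i j h
    unfold maskIdxs at h
    split at h
    · simp at h
    · split at h
      · rcases List.mem_cons.mp h with h | h
        · omega
        · have := ih (r - 1) (i + 1) j h; omega
      · have := ih r (i + 1) j h; omega

theorem emitMasked_cons_lt (mask_char : String) (k : Nat) :
    ∀ (cs : List Char) (i : Nat) (M : List Nat), k < i →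
    emitMasked cs i (k :: M) mask_char = emitMasked cs i M mask_char := by
  intro cs
  induction cs with
  | nil => intro i M _; rfl
  | cons b rest ih =>
    intro i M hk
    have hne : i ≠ k := by omega
    simp only [emitMasked, List.mem_cons, hne, false_or]
    rw [ih (i + 1) M (by omega)]

theorem emitMasked_nil (mask_char : String) :
    ∀ (cs : List Char) (i : Nat), emitMasked cs i [] mask_char = cs := by
  intro cs
  induction cs with
  | nil => intro i; rfl
  | cons b rest ih => intro i; simp [emitMasked, ih]

theorem goMask_zero (mask_char alphabets : String) :
    ∀ (cs : List Char), goMask cs 0 mask_char alphabets = cs := by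
  intro cs
  induction cs with
  | nil => rfl
  | cons b rest ih => simp [goMask, ih]

theorem emit_maskIdxs_eq_goMask (mask_char alphabets : String) :
    ∀ (cs : List Char) (r : Int) (i : Nat),
    emitMasked cs i (maskIdxs cs alphabets r i) mask_char = goMask cs r mask_char alphabets := by
  intro cs
  induction cs with
  | nil => intro r i; rfl
  | cons b rest ih =>
    intro r i
    unfold maskIdxs goMask
    by_cases hr : r = 0
    · subst hr
      rw [if_pos rfl]
      simp [emitMasked, emitMasked_nil, goMask_zero]
    · rw [if_neg hr]
      by_cases hb : b ∈ alphabets.toList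
      · rw [if_pos hb, if_pos ⟨hr, hb⟩]
        simp only [emitMasked, List.mem_cons, true_or, if_true]
        rw [emitMasked_cons_lt mask_char i rest (i + 1) _ (by omega), ih (r - 1) (i + 1)]
      · rw [if_neg hb, if_neg (by tauto)]
        simp only [emitMasked]
        have hni : i ∉ maskIdxs rest alphabets r (i + 1) := by
          intro h
          have := maskIdxs_ge alphabets rest r (i + 1) i h
          omega
        rw [if_neg hni, ih r (i + 1)]
        rfl

-- ===== VERDICT (by name: the statement is the Claim_ definition above) =====
theorem mask_left_spec : Claim_equal_mask_left := by
  intro seq length mask_char alphabets _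
  unfold Spec_mask_left mask_left mask_left_alt
  rw [foldl_eq_goMask, emit_maskIdxs_eq_goMask]
  rfl
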